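-- pv_equiv track=rewrite | github.com/bog-walk/project-euler-python | solution/batch6/problem53.py | count_large_combinatorics_improved
-- ===== SOURCE A (Python) =====
-- def count_large_combinatorics_improved(n: int, k: int) -> int:
--     """
--     Solution improved by not depending on factorials to pre-compute the binomial
--     coefficient, thereby also needing types that can handle >64 bits.
--
--     Solution is still based on the symmetry of Pascal's Triangle & its rules as
--     detailed in the solution above, with some additions:
--
--     -   :math:`C_{n}^{r+1} = C_{n}^{r} \\times (n-r) / (r+1)` and
--         :math:`C_{n-1}^{r} = C_{n}^{r} \\times (n-r) / n`.
--         Movement through the triangle (bottom-up & only checking border values)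
--         mimics that in the above function, but C(n, r) values when moving right
--         in a row or up a row are determined with these formulae, instead of
--         factorials.
--
--     -   Starting from the bottom of the triangle & moving up, if the value of r is
--         allowed to exceed its midline value, then it means no value > k was found and
--         the outer loop can be broken.
--
--     SPEED (BETTER)
--         1.10ms for N = 1e3, K = 1e3
--     """
--
--     count = 0
--     r, n_c_r = 0, 1  # start at left-most border
--     while r <= n // 2:
--         next_in_row = n_c_r * (n - r) // (r + 1)
--         if next_in_row > k:
--             # count formula differs from above function
--             # because r is 1 less than r in next_in_row
--             count += n - 2 * r - 1
--             n_c_r = n_c_r * (n - r) // n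
--             n -= 1
--         else:
--             r, n_c_r = r + 1, next_in_row
--     return count
-- ===== SOURCE B (Python) =====
-- def count_large_combinatorics_improved(n: int, k: int) -> int:
--     """Row-by-row sweep: for each row m of Pascal's triangle, walk the left
--     half with the multiplicative rule C(m,r+1) = C(m,r)*(m-r)//(r+1) until a
--     value exceeds k, then count the whole symmetric block m - 2*r + 1 at once."""
--     count = 0
--     for m in range(1, n + 1):
--         c = 1
--         for r in range(m // 2 + 1):
--             if c > k:
--                 count += m - 2 * r + 1
--                 break
--             c = c * (m - r) // (r + 1)
--     return count
-- ===== Notes on version B (the rewrite author's own statement) =====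
-- stated objective: simpler
-- what changed: A's single bottom-up border walk that mutates n and counts by the symmetry formula is replaced by an independent row-by-row sweep of Pascal's triangle: each row is scanned from the left with the multiplicative rule until an entry exceeds k, counting the symmetric middle block.
-- intended difference: For k = 0 and n >= 1, A returns n(n-1)/2, missing the border entries 1 > 0 of every row (its start value C(n,0)=1 is never compared against k), while B returns the intended full count n(n+3)/2 of all binomials strictly greater than 0. — e.g. on count_large_combinatorics_improved(1, 0): A returns 0, B returns 2
import Mathlib
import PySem

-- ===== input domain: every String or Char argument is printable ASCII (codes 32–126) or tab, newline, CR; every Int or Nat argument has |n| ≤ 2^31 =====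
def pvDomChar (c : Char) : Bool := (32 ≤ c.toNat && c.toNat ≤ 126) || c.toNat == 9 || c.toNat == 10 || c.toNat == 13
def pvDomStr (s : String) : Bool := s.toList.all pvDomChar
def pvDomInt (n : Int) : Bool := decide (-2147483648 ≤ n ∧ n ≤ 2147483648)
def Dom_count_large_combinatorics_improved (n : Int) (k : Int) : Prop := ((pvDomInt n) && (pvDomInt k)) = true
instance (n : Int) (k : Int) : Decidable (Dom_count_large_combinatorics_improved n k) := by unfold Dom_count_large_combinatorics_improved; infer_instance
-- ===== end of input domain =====

-- B replaces A's single bottom-up border walk (which mutates n) by an independent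
-- row-by-row sweep of Pascal's triangle; objective: simpler. B additionally counts
-- the border 1s when k = 0 (see D_).

-- ===== PORT A =====
-- A's while loop; the extra Nat argument is fuel making the recursion structural
-- (the initial fuel n+2 is proved sufficient wherever A terminates).
def pvLoopA (k : Int) : Nat → Int → Int → Int → Int → Int
  | 0, count, _, _, _ => count
  | fuel+1, count, r, n, c =>
    if r ≤ PySem.Int.floordiv n 2 then
      if PySem.Int.floordiv (c * (n - r)) (r + 1) > k then
        pvLoopA k fuel (count + (n - 2*r - 1)) r (n - 1)
          (PySem.Int.floordiv (c * (n - r)) n)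
      else
        pvLoopA k fuel count (r + 1) n (PySem.Int.floordiv (c * (n - r)) (r + 1))
    else count

def count_large_combinatorics_improved (n : Int) (k : Int) : Int :=
  pvLoopA k (n + 2).toNat 0 0 n 1

-- ===== PORT B =====
-- B's inner loop: scan row m from the left; on the first value > k count the
-- symmetric block m - 2*r + 1 and stop (the `break`); steps counts down from m//2 + 1.
def pvRowScan (k m : Int) : Nat → Int → Int → Int
  | 0, _, _ => 0
  | steps+1, r, c =>
    if c > k then m - 2*r + 1
    else pvRowScan k m steps (r + 1) (PySem.Int.floordiv (c * (m - r)) (r + 1))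

def count_large_combinatorics_improved_alt (n : Int) (k : Int) : Int :=
  (PySem.List.pyRange 1 (n + 1)).foldl
    (fun count m => count + pvRowScan k m (PySem.Int.floordiv m 2 + 1).toNat 0 1) 0

-- ===== PRECONDITION & SPEC =====
-- Pre_ excludes exactly n ≥ 0 ∧ k < 0, where A's upward walk reaches row 0 and
-- raises ZeroDivisionError on `n_c_r * (n - r) // n`.
def Pre_count_large_combinatorics_improved (n : Int) (k : Int) : Prop := 0 ≤ n → 0 ≤ k
instance (n : Int) (k : Int) : Decidable (Pre_count_large_combinatorics_improved n k) := by
  unfold Pre_count_large_combinatorics_improved; infer_instance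

def pvWitness_count_large_combinatorics_improved : Int × Int := (6, 3)

-- For k = 0 and n ≥ 1, A returns n(n-1)/2, missing the border entries 1 > 0 of every
-- row (its start value C(n,0)=1 is never compared against k), while B returns the
-- intended full count n(n+3)/2 of all binomials strictly greater than 0.
def D_count_large_combinatorics_improved (n : Int) (k : Int) : Prop := k = 0 ∧ 1 ≤ n
instance (n : Int) (k : Int) : Decidable (D_count_large_combinatorics_improved n k) := by
  unfold D_count_large_combinatorics_improved; infer_instance

def Spec_count_large_combinatorics_improved (n : Int) (k : Int) (out : Int) : Prop :=
  ¬ D_count_large_combinatorics_improved n k → out = count_large_combinatorics_improved_alt n k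
instance (n : Int) (k : Int) (out : Int) : Decidable (Spec_count_large_combinatorics_improved n k out) := by
  unfold Spec_count_large_combinatorics_improved; infer_instance

def pvDiffWitness_count_large_combinatorics_improved : Int × Int := (1, 0)
def pvDiffWitnessOut_count_large_combinatorics_improved : Int × Int := (0, 2)

-- ===== CLAIM (what is proved, stated in full; the proofs are below) =====
def Claim_unchanged_count_large_combinatorics_improved : Prop := ∀ (n : Int) (k : Int), Dom_count_large_combinatorics_improved n k → Pre_count_large_combinatorics_improved n k → Spec_count_large_combinatorics_improved n k (count_large_combinatorics_improved n k)
def Claim_changed_count_large_combinatorics_improved : Prop := Dom_count_large_combinatorics_improved (pvDiffWitness_count_large_combinatorics_improved.1) (pvDiffWitness_count_large_combinatorics_improved.2) ∧ Pre_count_large_combinatorics_improved (pvDiffWitness_count_large_combinatorics_improved.1) (pvDiffWitness_count_large_combinatorics_improved.2) ∧ D_count_large_combinatorics_improved (pvDiffWitness_count_large_combinatorics_improved.1) (pvDiffWitness_count_large_combinatorics_improved.2) ∧ count_large_combinatorics_improved (pvDiffWitness_count_large_combinatorics_improved.1) (pvDiffWitness_count_large_combinatorics_improved.2) = pvDiffWitnessOut_count_large_combinatorics_improved.1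 ∧ count_large_combinatorics_improved_alt (pvDiffWitness_count_large_combinatorics_improved.1) (pvDiffWitness_count_large_combinatorics_improved.2) = pvDiffWitnessOut_count_large_combinatorics_improved.2 ∧ pvDiffWitnessOut_count_large_combinatorics_improved.1 ≠ pvDiffWitnessOut_count_large_combinatorics_improved.2
def Claim_exact_count_large_combinatorics_improved : Prop := ∀ (n : Int) (k : Int), Dom_count_large_combinatorics_improved n k → Pre_count_large_combinatorics_improved n k → D_count_large_combinatorics_improved n k → count_large_combinatorics_improved n k ≠ count_large_combinatorics_improved_alt n k

-- ===== LEMMAS AND PROOFS =====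

-- number of entries of row m of Pascal's triangle strictly greater than K
def pvRowCount (m K : Nat) : Nat :=
  ((Finset.range (m + 1)).filter (fun s => K < Nat.choose m s)).card

-- total over rows 0..n (row 0 contributes nothing once K ≥ 1)
def pvTot (n K : Nat) : Nat := ∑ m ∈ Finset.range (n + 1), pvRowCount m K

-- C(m,·) is monotone up to the middle
theorem pvChooseMono {m s t : Nat} (hst : s ≤ t) (ht : t ≤ m / 2) :
    Nat.choose m s ≤ Nat.choose m t := by
  induction t with
  | zero => simp_all
  | succ t ih =>
    rcases Nat.lt_or_ge s (t + 1) with h | h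
    · exact le_trans (ih (by omega) (by omega))
        (Nat.choose_le_succ_of_lt_half_left (by omega))
    · have : s = t + 1 := by omega
      simp [this]

-- C(n,r)·(n-r) = n·C(n-1,r)
theorem pvChooseUp (n r : Nat) (hn : 1 ≤ n) :
    Nat.choose n r * (n - r) = n * Nat.choose (n - 1) r := by
  obtain ⟨m, rfl⟩ : ∃ m, n = m + 1 := ⟨n - 1, by omega⟩
  have h1 := Nat.choose_succ_right_eq (m + 1) r
  have h2 := Nat.succ_mul_choose_eq m r
  simp only [Nat.succ_eq_add_one] at h2
  simp only [Nat.add_sub_cancel]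
  omega

-- if the first index whose entry exceeds K is r0 ≤ m/2, the row has m+1-2r0 large entries
theorem pvRowCountEq (m r0 K : Nat) (h1 : ∀ s < r0, Nat.choose m s ≤ K)
    (h2 : K < Nat.choose m r0) (h3 : 2 * r0 ≤ m) :
    pvRowCount m K = m + 1 - 2 * r0 := by
  have key : ∀ s, s < m + 1 → (K < Nat.choose m s ↔ (r0 ≤ s ∧ s ≤ m - r0)) := by
    intro s hs
    constructor
    · intro hK
      by_contra hc
      rcases Nat.lt_or_ge s r0 with h | h
      · exact absurd hK (not_lt.mpr (h1 s h))
      · have hms : m - s < r0 := by omega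
        have hsym : Nat.choose m (m - s) = Nat.choose m s :=
          Nat.choose_symm (by omega)
        have := h1 (m - s) hms
        omega
    · intro ⟨hl, hr⟩
      by_cases h : s ≤ m / 2
      · exact lt_of_lt_of_le h2 (pvChooseMono hl h)
      · have hsym : Nat.choose m (m - s) = Nat.choose m s :=
          Nat.choose_symm (by omega)
        have : Nat.choose m r0 ≤ Nat.choose m (m - s) :=
          pvChooseMono (by omega) (by omega)
        omega
  have hfilter : (Finset.range (m + 1)).filter (fun s => K < Nat.choose m s)
      = Finset.Icc r0 (m - r0) := by
    ext s
    simp only [Finset.mem_filter, Finset.mem_range, Finset.mem_Icc]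
    constructor
    · intro ⟨hs, hK⟩; exact (key s hs).mp hK
    · intro h; exact ⟨by omega, (key s (by omega)).mpr h⟩
  rw [pvRowCount, hfilter, Nat.card_Icc]
  omega

-- if no entry up to the middle exceeds K the row has no large entry
theorem pvRowCountZero (m K : Nat) (h : ∀ s, s ≤ m / 2 → Nat.choose m s ≤ K) :
    pvRowCount m K = 0 := by
  rw [pvRowCount, Finset.card_eq_zero, Finset.filter_eq_empty_iff]
  intro s hs
  simp only [Finset.mem_range] at hs
  simp only [not_lt]
  by_cases hh : s ≤ m / 2
  · exact h s hh
  · have hsym : Nat.choose m (m - s) = Nat.choose m s := Nat.choose_symm (by omega)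
    have := h (m - s) (by omega)
    omega

-- the multiplicative step computes the next binomial coefficient
theorem pvStep (m r : Nat) (hr : r ≤ m) :
    PySem.Int.floordiv ((Nat.choose m r : Int) * ((m : Int) - (r : Int))) ((r : Int) + 1)
      = (Nat.choose m (r + 1) : Int) := by
  have hcast : (Nat.choose m r : Int) * ((m : Int) - (r : Int))
      = ((Nat.choose m (r + 1) * (r + 1) : Nat) : Int) := by
    rw [Nat.choose_succ_right_eq]
    push_cast [Nat.cast_sub hr]
    ring
  rw [hcast]
  have : ((r : Int) + 1) = (((r + 1 : Nat)) : Int) := by push_cast; ring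
  rw [this, PySem.Int.floordiv_natCast, Nat.mul_div_cancel _ (by omega : 0 < r + 1)]

-- the up-a-row step computes the previous row's binomial coefficient
theorem pvUp (m r : Nat) (hm : 1 ≤ m) (hr : r ≤ m) :
    PySem.Int.floordiv ((Nat.choose m r : Int) * ((m : Int) - (r : Int))) (m : Int)
      = (Nat.choose (m - 1) r : Int) := by
  have hcast : (Nat.choose m r : Int) * ((m : Int) - (r : Int))
      = ((m * Nat.choose (m - 1) r : Nat) : Int) := by
    rw [← pvChooseUp m r hm]
    push_cast [Nat.cast_sub hr]
    ring
  rw [hcast, PySem.Int.floordiv_natCast, Nat.mul_div_cancel_left _ (by omega)]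

-- past the middle with all entries ≤ K so far, the whole remaining triangle is small
theorem pvExitTot (nN K rN : Nat) (hr : nN / 2 < rN)
    (inv : ∀ s, s ≤ rN → Nat.choose nN s ≤ K) : pvTot nN K = 0 := by
  rw [pvTot]
  apply Finset.sum_eq_zero
  intro m hm
  simp only [Finset.mem_range] at hm
  apply pvRowCountZero
  intro s hs
  have hsm : s ≤ rN := by omega
  exact le_trans (Nat.choose_le_choose s (by omega)) (inv s hsm)

-- floordiv of a cast by 2
theorem pvHalf (nN : Nat) : PySem.Int.floordiv (nN : Int) 2 = ((nN / 2 : Nat) : Int) := by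
  have : (2 : Int) = ((2 : Nat) : Int) := by norm_num
  rw [this, PySem.Int.floordiv_natCast]

-- A's loop invariant: with c = C(n,r) and everything up to r known small,
-- the loop adds exactly the number of large entries of rows 0..n
theorem pvLoopAEq (K : Nat) :
    ∀ (fuel : Nat) (nN rN : Nat) (count : Int),
      nN + 1 < fuel + 2 * rN →
      (∀ s, s ≤ rN → Nat.choose nN s ≤ K) →
      pvLoopA (K : Int) fuel count (rN : Int) (nN : Int) (Nat.choose nN rN : Int)
        = count + (pvTot nN K : Int) := by
  intro fuel
  induction fuel with
  | zero =>
    intro nN rN count hfuel inv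
    have : pvTot nN K = 0 := pvExitTot nN K rN (by omega) inv
    simp [pvLoopA, this]
  | succ fuel ih =>
    intro nN rN count hfuel inv
    rw [pvLoopA]
    rw [pvHalf]
    by_cases hguard : (rN : Int) ≤ ((nN / 2 : Nat) : Int)
    · have hrhalf : rN ≤ nN / 2 := by exact_mod_cast hguard
      have h2r : 2 * rN ≤ nN := by omega
      have hrn : rN ≤ nN := by omega
      rw [if_pos hguard, pvStep nN rN hrn]
      by_cases hnext : (Nat.choose nN (rN + 1) : Int) > (K : Int)
      · rw [if_pos hnext]
        have hKlt : K < Nat.choose nN (rN + 1) := by exact_mod_cast hnext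
        -- the symmetric partner rules out 2r = n and 2r + 1 = n
        have hn2 : 2 * rN + 2 ≤ nN := by
          by_contra hc
          rcases (by omega : nN = 2 * rN ∨ nN = 2 * rN + 1) with h | h
          · rcases Nat.eq_zero_or_pos rN with hz | hp
            · subst hz; simp [h] at hKlt
            · have : Nat.choose nN (rN + 1) = Nat.choose nN (rN - 1) :=
                Nat.choose_symm_of_eq_add (by omega)
              have := inv (rN - 1) (by omega)
              omega
          · have : Nat.choose nN (rN + 1) = Nat.choose nN rN :=
              Nat.choose_symm_of_eq_add (by omega)
            have := inv rN (le_refl _)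
            omega
        have hrow : pvRowCount nN K = nN + 1 - 2 * (rN + 1) :=
          pvRowCountEq nN (rN + 1) K (fun s hs => inv s (by omega)) hKlt (by omega)
        have hup : PySem.Int.floordiv ((Nat.choose nN rN : Int) * ((nN : Int) - (rN : Int))) (nN : Int)
            = (Nat.choose (nN - 1) rN : Int) := pvUp nN rN (by omega) hrn
        rw [hup]
        have hcast : (nN : Int) - 1 = ((nN - 1 : Nat) : Int) := by
          push_cast [Nat.cast_sub (by omega : 1 ≤ nN)]; ring
        rw [hcast]
        rw [ih (nN - 1) rN _ (by omega)
          (fun s hs => le_trans (Nat.choose_le_choose s (by omega)) (inv s hs))]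
        have htot : pvTot nN K = pvTot (nN - 1) K + pvRowCount nN K := by
          rw [pvTot, pvTot]
          have : nN - 1 + 1 = nN := by omega
          rw [this, Finset.sum_range_succ]
        rw [htot, hrow]
        push_cast
        omega
      · rw [if_neg hnext]
        have hKge : Nat.choose nN (rN + 1) ≤ K := by
          have : (Nat.choose nN (rN + 1) : Int) ≤ (K : Int) := by omega
          exact_mod_cast this
        have hcast : (rN : Int) + 1 = ((rN + 1 : Nat) : Int) := by push_cast; ring
        rw [hcast]
        exact ih nN (rN + 1) count (by omega)
          (fun s hs => by
            rcases Nat.lt_or_ge s (rN + 1) with h | h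
            · exact inv s (by omega)
            · have : s = rN + 1 := by omega
              simpa [this] using hKge)
    · rw [if_neg hguard]
      have hr2 : nN / 2 < rN := by exact_mod_cast not_le.mp hguard
      have htot : pvTot nN K = 0 := pvExitTot nN K rN hr2 inv
      simp [htot]

-- B's inner loop computes the row count
theorem pvRowScanEq (K : Nat) (mN : Nat) :
    ∀ (steps rN : Nat),
      steps + rN = mN / 2 + 1 →
      (∀ s, s < rN → Nat.choose mN s ≤ K) →
      pvRowScan (K : Int) (mN : Int) steps (rN : Int) (Nat.choose mN rN : Int)
        = (pvRowCount mN K : Int) := by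
  intro steps
  induction steps with
  | zero =>
    intro rN hsum inv
    have : pvRowCount mN K = 0 :=
      pvRowCountZero mN K (fun s hs => inv s (by omega))
    simp [pvRowScan, this]
  | succ steps ih =>
    intro rN hsum inv
    rw [pvRowScan]
    by_cases hc : (Nat.choose mN rN : Int) > (K : Int)
    · rw [if_pos hc]
      have hKlt : K < Nat.choose mN rN := by exact_mod_cast hc
      have hrow : pvRowCount mN K = mN + 1 - 2 * rN :=
        pvRowCountEq mN rN K inv hKlt (by omega)
      rw [hrow]
      push_cast [Nat.cast_sub (by omega : 2 * rN ≤ mN + 1)]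
      ring
    · rw [if_neg hc]
      have hrn : rN ≤ mN := by omega
      rw [pvStep mN rN hrn]
      have hcast : (rN : Int) + 1 = ((rN + 1 : Nat) : Int) := by push_cast; ring
      rw [hcast]
      exact ih (rN + 1) (by omega)
        (fun s hs => by
          rcases Nat.lt_or_ge s rN with h | h
          · exact inv s h
          · have : s = rN := by omega
            subst this
            have : (Nat.choose mN s : Int) ≤ (K : Int) := by omega
            exact_mod_cast this)

-- B's outer fold sums the rows
theorem pvAltEq (K : Nat) (hK : 1 ≤ K) :
    ∀ (nN : Nat),
      count_large_combinatorics_improved_alt (nN : Int) (K : Int) = (pvTot nN K : Int) := by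
  intro nN
  induction nN with
  | zero =>
    have h0 : pvRowCount 0 K = 0 :=
      pvRowCountZero 0 K (fun s hs => by interval_cases s <;> simp [hK] <;> omega)
    simp [count_large_combinatorics_improved_alt, pvTot, h0, PySem.List.pyRange]
  | succ nN ih =>
    have hstep : PySem.List.pyRange 1 (((nN + 1 : Nat) : Int) + 1)
        = PySem.List.pyRange 1 ((nN : Int) + 1) ++ [(nN : Int) + 1] := by
      have : (((nN + 1 : Nat) : Int) + 1) = ((nN : Int) + 1) + 1 := by push_cast; ring
      rw [this, PySem.List.pyRange_one_succ_right (by omega)]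
    rw [count_large_combinatorics_improved_alt, hstep, List.foldl_append]
    rw [← count_large_combinatorics_improved_alt, ih]
    simp only [List.foldl_cons, List.foldl_nil]
    have hm : ((nN : Int) + 1) = ((nN + 1 : Nat) : Int) := by push_cast; ring
    rw [hm, pvHalf]
    have hsteps : ((((nN + 1) / 2 : Nat) : Int) + 1).toNat = (nN + 1) / 2 + 1 := by omega
    rw [hsteps]
    have h0 : ((0 : Int)) = ((0 : Nat) : Int) := by norm_num
    have h1 : ((1 : Int)) = ((Nat.choose (nN + 1) 0 : Nat) : Int) := by simp
    rw [h0, h1, pvRowScanEq K (nN + 1) ((nN + 1) / 2 + 1) 0 (by omega) (fun s hs => by omega)]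
    simp only [pvTot, Finset.sum_range_succ]
    push_cast
    ring

-- A's closed form at k = 0
theorem pvAZero : ∀ (fuel nN : Nat) (count : Int), nN + 1 < fuel →
    pvLoopA 0 fuel count 0 (nN : Int) 1 = count + (Nat.choose nN 2 : Int) := by
  intro fuel
  induction fuel with
  | zero => intro nN count h; omega
  | succ fuel ih =>
    intro nN count h
    rw [pvLoopA, pvHalf]
    rcases Nat.eq_zero_or_pos nN with hz | hp
    · subst hz
      simp only [Nat.zero_div, Nat.cast_zero]
      rw [if_pos (by norm_num)]
      norm_num [PySem.Int.floordiv]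
      obtain ⟨f, rfl⟩ : ∃ f, fuel = f + 1 := ⟨fuel - 1, by omega⟩
      rw [pvLoopA]
      norm_num [PySem.Int.floordiv]
    · rw [if_pos (by positivity)]
      have hnext : PySem.Int.floordiv (1 * ((nN : Int) - 0)) (0 + 1) = (nN : Int) := by
        simp only [one_mul, sub_zero, zero_add]
        rw [PySem.Int.floordiv_eq_ediv_of_pos (by norm_num)]
        simp
      rw [hnext]
      rw [if_pos (by exact_mod_cast hp)]
      have hup : PySem.Int.floordiv (1 * ((nN : Int) - 0)) (nN : Int) = 1 := by
        simp only [one_mul, sub_zero]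
        rw [PySem.Int.floordiv_eq_ediv_of_pos (by exact_mod_cast hp)]
        exact Int.ediv_self (by exact_mod_cast hp.ne')
      rw [hup]
      have hcast : (nN : Int) - 1 = ((nN - 1 : Nat) : Int) := by
        push_cast [Nat.cast_sub hp]; ring
      rw [hcast, ih (nN - 1) _ (by omega)]
      have hch : Nat.choose nN 2 = Nat.choose (nN - 1) 2 + (nN - 1) := by
        obtain ⟨m, rfl⟩ : ∃ m, nN = m + 1 := ⟨nN - 1, by omega⟩
        simp [Nat.choose_succ_succ, Nat.choose_one_right]
        omega
      rw [hch]
      push_cast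
      omega

-- B's closed form at k = 0
theorem pvBZero : ∀ (nN : Nat),
    count_large_combinatorics_improved_alt (nN : Int) 0
      = (Nat.choose (nN + 2) 2 : Int) - 1 := by
  intro nN
  induction nN with
  | zero => decide
  | succ nN ih =>
    have hstep : PySem.List.pyRange 1 (((nN + 1 : Nat) : Int) + 1)
        = PySem.List.pyRange 1 ((nN : Int) + 1) ++ [(nN : Int) + 1] := by
      have : (((nN + 1 : Nat) : Int) + 1) = ((nN : Int) + 1) + 1 := by push_cast; ring
      rw [this, PySem.List.pyRange_one_succ_right (by omega)]
    rw [count_large_combinatorics_improved_alt, hstep, List.foldl_append]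
    rw [← count_large_combinatorics_improved_alt, ih]
    simp only [List.foldl_cons, List.foldl_nil]
    have hscan : pvRowScan 0 ((nN : Int) + 1)
        ((PySem.Int.floordiv ((nN : Int) + 1) 2 + 1).toNat) 0 1 = (nN : Int) + 2 := by
      obtain ⟨s, hs⟩ : ∃ s, (PySem.Int.floordiv ((nN : Int) + 1) 2 + 1).toNat = s + 1 := by
        refine ⟨(PySem.Int.floordiv ((nN : Int) + 1) 2).toNat, ?_⟩
        rw [PySem.Int.floordiv_eq_ediv_of_pos (by norm_num)]
        omega
      rw [hs, pvRowScan]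
      rw [if_pos (by norm_num)]
      ring
    rw [hscan]
    have hch : Nat.choose (nN + 1 + 2) 2 = Nat.choose (nN + 2) 2 + (nN + 2) := by
      simp [Nat.choose_succ_succ (nN + 2) 1, Nat.choose_one_right]
      omega
    rw [hch]
    push_cast
    ring

-- ===== VERDICT (by name: the statement is the Claim_ definition above) =====
theorem count_large_combinatorics_improved_spec : Claim_unchanged_count_large_combinatorics_improved := by
  intro n k hdom hpre hnd
  rcases Int.lt_or_le n 0 with hn | hn
  · -- n < 0: A's guard fails at once, B's range is empty
    have hA : count_large_combinatorics_improved n k = 0 := by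
      rw [count_large_combinatorics_improved]
      obtain ⟨f, hf⟩ : ∃ f, (n + 2).toNat = f := ⟨_, rfl⟩
      cases f with
      | zero => simp [hf, pvLoopA]
      | succ f =>
        rw [hf, pvLoopA]
        rw [if_neg (by rw [PySem.Int.floordiv_eq_ediv_of_pos (by norm_num)]; omega)]
    have hB : count_large_combinatorics_improved_alt n k = 0 := by
      rw [count_large_combinatorics_improved_alt]
      have hemp : PySem.List.pyRange 1 (n + 1) = [] := by
        rw [PySem.List.pyRange_one]
        have h0 : (n + 1 - 1).toNat = 0 := by omega
        rw [h0]
        simp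
      simp [hemp]
    rw [hA, hB]
  · have hk0 : 0 ≤ k := hpre hn
    rcases Int.lt_or_le 0 k with hk | hk
    · -- k ≥ 1: the main argument
      obtain ⟨nN, rfl⟩ : ∃ m : Nat, n = (m : Int) := ⟨n.toNat, by omega⟩
      obtain ⟨kN, rfl⟩ : ∃ m : Nat, k = (m : Int) := ⟨k.toNat, by omega⟩
      have hK : 1 ≤ kN := by exact_mod_cast hk
      have hmain := pvLoopAEq kN (nN + 2) nN 0 0 (by omega)
        (fun s hs => by
          have : s = 0 := by omega
          subst this
          simp [Nat.choose_zero_right]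
          omega)
      simp only [Nat.cast_zero, Nat.choose_zero_right, Nat.cast_one] at hmain
      have hfuel : ((nN : Int) + 2).toNat = nN + 2 := by omega
      rw [count_large_combinatorics_improved, hfuel, hmain, pvAltEq kN hK nN]
      omega
    · -- k = 0 and (¬D) force n = 0
      have hk' : k = 0 := by omega
      have hn' : n = 0 := by
        by_contra hc
        exact hnd ⟨hk', by omega⟩
      subst hk'; subst hn'
      decide

theorem count_large_combinatorics_improved_changed : Claim_changed_count_large_combinatorics_improved := by
  unfold Claim_changed_count_large_combinatorics_improved
  decide

theorem count_large_combinatorics_improved_tight : Claim_exact_count_large_combinatorics_improved := by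
  intro n k hdom hpre hd
  obtain ⟨hk, hn⟩ := hd
  subst hk
  obtain ⟨nN, rfl⟩ : ∃ m : Nat, n = (m : Int) := ⟨n.toNat, by omega⟩
  have hfuel : ((nN : Int) + 2).toNat = nN + 2 := by omega
  rw [count_large_combinatorics_improved, hfuel,
    pvAZero (nN + 2) nN 0 (by omega), pvBZero nN]
  have h1 : Nat.choose (nN + 2) 2 = Nat.choose nN 2 + 2 * nN + 1 := by
    have a1 : Nat.choose (nN + 2) 2 = Nat.choose (nN + 1) 2 + (nN + 1) := by
      simp [Nat.choose_succ_succ (nN + 1) 1, Nat.choose_one_right]; omega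
    have a2 : Nat.choose (nN + 1) 2 = Nat.choose nN 2 + nN := by
      simp [Nat.choose_succ_succ nN 1, Nat.choose_one_right]; omega
    omega
  have hn1 : 1 ≤ nN := by exact_mod_cast hn
  push_cast [h1]
  omega
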